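-- pv_equiv track=rewrite | github.com/znbmalik/KFF-master | WT/my_model/my_Scripts/keyframe/clorclustering.py | compareHSV
-- ===== SOURCE A (Python) =====
-- def compareHSV(bar0, bar1, a_margin=0, nc_margin=0, m_margin=0):
--     newColor=[]
--     for b in bar1:
--
--         flag=False
--         for bb in bar0:
--             if (abs(b[1]-bb[1])<=a_margin) and (abs(b[2]-bb[2])<=m_margin):
--                 flag=True
--
--         if flag==False:#new color not in range of any exiting color
--             if b[0] > nc_margin  or b[2] > m_margin:
--                 newColor.append(b)
--
--
--     for b in bar0:
--         flag1=False
--         for bb in bar1: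
--             if (abs(b[1]-bb[1])<=a_margin) and (abs(b[2]-bb[2])<=m_margin):
--                 flag1=True
--
--         if flag1==False:#new color not in range of any exiting color
--             if b[0] > nc_margin or b[2] > m_margin:
--                 newColor.append(b)
--     return newColor
-- ===== SOURCE B (Python) =====
-- def _bisect_left(keys, x):
--     lo, hi = 0, len(keys)
--     while lo < hi:
--         mid = (lo + hi) // 2
--         if keys[mid] < x:
--             lo = mid + 1
--         else:
--             hi = mid
--     return lo
--
--
-- def _bisect_right(keys, x):
--     lo, hi = 0, len(keys)
--     while lo < hi:
--         mid = (lo + hi) // 2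
--         if x < keys[mid]:
--             hi = mid
--         else:
--             lo = mid + 1
--     return lo
--
--
-- def _new_colors(src, other, a_margin, nc_margin, m_margin):
--     # sort the other bar on the hue coordinate once; per color, binary-search
--     # the hue window and scan only the colors inside it
--     srt = sorted(other, key=lambda r: r[1])
--     keys = [r[1] for r in srt]
--     out = []
--     for b in src:
--         lo = _bisect_left(keys, b[1] - a_margin)
--         hi = _bisect_right(keys, b[1] + a_margin)
--         matched = any(abs(b[2] - bb[2]) <= m_margin for bb in srt[lo:hi])
--         if not matched and (b[0] > nc_margin or b[2] > m_margin):
--             out.append(b)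
--     return out
--
--
-- def compareHSV(bar0, bar1, a_margin=0, nc_margin=0, m_margin=0):
--     return _new_colors(bar1, bar0, a_margin, nc_margin, m_margin) + \
--            _new_colors(bar0, bar1, a_margin, nc_margin, m_margin)
-- ===== Notes on version B (the rewrite author's own statement) =====
-- stated objective: faster
-- what changed: B sorts each bar by the hue coordinate once and, per color, binary-searches the hue window and scans only the colors inside it, instead of A's full inner scan per color.
-- outside the precondition, e.g. on compareHSV([[5]], [], 0, 0, 0): A returns [[5]], B raises IndexError
import Mathlib
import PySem

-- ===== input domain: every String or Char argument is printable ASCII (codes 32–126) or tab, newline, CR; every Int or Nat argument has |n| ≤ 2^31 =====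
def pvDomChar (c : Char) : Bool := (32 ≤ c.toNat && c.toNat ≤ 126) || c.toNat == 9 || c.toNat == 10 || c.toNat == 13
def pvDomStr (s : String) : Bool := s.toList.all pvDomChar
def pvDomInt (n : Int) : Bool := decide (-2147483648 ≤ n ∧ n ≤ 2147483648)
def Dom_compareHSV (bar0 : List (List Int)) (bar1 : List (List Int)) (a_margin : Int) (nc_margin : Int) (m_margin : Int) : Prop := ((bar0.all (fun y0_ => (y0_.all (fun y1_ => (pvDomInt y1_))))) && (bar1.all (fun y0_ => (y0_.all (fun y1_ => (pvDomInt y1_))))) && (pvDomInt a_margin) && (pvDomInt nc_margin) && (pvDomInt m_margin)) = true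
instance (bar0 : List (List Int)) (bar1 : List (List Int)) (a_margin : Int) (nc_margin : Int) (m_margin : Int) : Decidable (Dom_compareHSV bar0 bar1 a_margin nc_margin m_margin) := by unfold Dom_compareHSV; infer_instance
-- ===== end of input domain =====

-- B replaces A's full inner scan per color by one sort of each bar on the hue
-- coordinate plus a binary-searched hue window per color.
-- Rows are HSV triples; Pre_ requires length ≥ 3, where all indexing is in
-- range, so the pyGetD default 0 is never used.

-- ===== PORT A =====
def compareHSV (bar0 : List (List Int)) (bar1 : List (List Int)) (a_margin : Int) (nc_margin : Int) (m_margin : Int) : List (List Int) :=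
  let newColor : List (List Int) := []
  let newColor := bar1.foldl (fun newColor b =>
    let flag := bar0.foldl (fun flag bb =>
      if |PySem.List.pyGetD b 1 0 - PySem.List.pyGetD bb 1 0| ≤ a_margin ∧
         |PySem.List.pyGetD b 2 0 - PySem.List.pyGetD bb 2 0| ≤ m_margin then true else flag) false
    if flag = false then
      if PySem.List.pyGetD b 0 0 > nc_margin ∨ PySem.List.pyGetD b 2 0 > m_margin then
        newColor ++ [b]
      else newColor
    else newColor) newColor
  bar0.foldl (fun newColor b =>
    let flag1 := bar1.foldl (fun flag1 bb =>
      if |PySem.List.pyGetD b 1 0 - PySem.List.pyGetD bb 1 0| ≤ a_margin ∧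
         |PySem.List.pyGetD b 2 0 - PySem.List.pyGetD bb 2 0| ≤ m_margin then true else flag1) false
    if flag1 = false then
      if PySem.List.pyGetD b 0 0 > nc_margin ∨ PySem.List.pyGetD b 2 0 > m_margin then
        newColor ++ [b]
      else newColor
    else newColor) newColor

-- ===== PORT B =====
-- _new_colors of Source B; _bisect_left/_bisect_right of Source B are the stdlib
-- binary-search loops, ported as the primitives PySem.List.bisectLeft / bisectRight
def pvNewColors (src : List (List Int)) (other : List (List Int)) (a_margin : Int) (nc_margin : Int) (m_margin : Int) : List (List Int) :=
  let srt := PySem.List.sorted other (fun r => PySem.List.pyGetD r 1 0)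
  let keys := srt.map (fun r => PySem.List.pyGetD r 1 0)
  src.foldl (fun out b =>
    let lo := PySem.List.bisectLeft keys (PySem.List.pyGetD b 1 0 - a_margin)
    let hi := PySem.List.bisectRight keys (PySem.List.pyGetD b 1 0 + a_margin)
    let matched := (PySem.List.slice srt (some (lo : Int)) (some (hi : Int))).any
      (fun bb => decide (|PySem.List.pyGetD b 2 0 - PySem.List.pyGetD bb 2 0| ≤ m_margin))
    if matched = false ∧ (PySem.List.pyGetD b 0 0 > nc_margin ∨ PySem.List.pyGetD b 2 0 > m_margin) then
      out ++ [b]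
    else out) []

def compareHSV_alt (bar0 : List (List Int)) (bar1 : List (List Int)) (a_margin : Int) (nc_margin : Int) (m_margin : Int) : List (List Int) :=
  pvNewColors bar1 bar0 a_margin nc_margin m_margin ++ pvNewColors bar0 bar1 a_margin nc_margin m_margin

-- ===== PRECONDITION & SPEC =====
-- Pre_ excludes rows shorter than 3 entries: on them the Python A raises
-- IndexError (except in degenerate cases where an empty opposite bar lets a
-- short row through by short-circuit, where B raises instead).
def Pre_compareHSV (bar0 : List (List Int)) (bar1 : List (List Int)) (a_margin : Int) (nc_margin : Int) (m_margin : Int) : Prop :=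
  (∀ r ∈ bar0, 3 ≤ r.length) ∧ (∀ r ∈ bar1, 3 ≤ r.length)
instance (bar0 : List (List Int)) (bar1 : List (List Int)) (a_margin : Int) (nc_margin : Int) (m_margin : Int) : Decidable (Pre_compareHSV bar0 bar1 a_margin nc_margin m_margin) := by unfold Pre_compareHSV; infer_instance

def pvWitness_compareHSV : List (List Int) × List (List Int) × Int × Int × Int :=
  ([[1, 2, 3]], [[4, 5, 6]], 1, 0, 1)

def Spec_compareHSV (bar0 : List (List Int)) (bar1 : List (List Int)) (a_margin : Int) (nc_margin : Int) (m_margin : Int) (out : List (List Int)) : Prop := out = compareHSV_alt bar0 bar1 a_margin nc_margin m_margin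
instance (bar0 : List (List Int)) (bar1 : List (List Int)) (a_margin : Int) (nc_margin : Int) (m_margin : Int) (out : List (List Int)) : Decidable (Spec_compareHSV bar0 bar1 a_margin nc_margin m_margin out) := by unfold Spec_compareHSV; infer_instance

-- ===== CLAIM (what is proved, stated in full; the proofs are below) =====
def Claim_equal_compareHSV : Prop := ∀ (bar0 : List (List Int)) (bar1 : List (List Int)) (a_margin : Int) (nc_margin : Int) (m_margin : Int), Dom_compareHSV bar0 bar1 a_margin nc_margin m_margin → Pre_compareHSV bar0 bar1 a_margin nc_margin m_margin → Spec_compareHSV bar0 bar1 a_margin nc_margin m_margin (compareHSV bar0 bar1 a_margin nc_margin m_margin)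

-- ===== LEMMAS AND PROOFS =====

-- A's inner flag loop is List.any of the two-sided margin test
lemma pvFlag_eq (b : List Int) (other : List (List Int)) (a_margin m_margin : Int) :
    other.foldl (fun flag bb =>
      if |PySem.List.pyGetD b 1 0 - PySem.List.pyGetD bb 1 0| ≤ a_margin ∧
         |PySem.List.pyGetD b 2 0 - PySem.List.pyGetD bb 2 0| ≤ m_margin then true else flag) false
    = other.any (fun bb => decide (|PySem.List.pyGetD b 1 0 - PySem.List.pyGetD bb 1 0| ≤ a_margin ∧
        |PySem.List.pyGetD b 2 0 - PySem.List.pyGetD bb 2 0| ≤ m_margin)) := by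
  have h : (fun (flag : Bool) bb =>
      if |PySem.List.pyGetD b 1 0 - PySem.List.pyGetD bb 1 0| ≤ a_margin ∧
         |PySem.List.pyGetD b 2 0 - PySem.List.pyGetD bb 2 0| ≤ m_margin then true else flag)
      = (fun flag bb => if (decide (|PySem.List.pyGetD b 1 0 - PySem.List.pyGetD bb 1 0| ≤ a_margin ∧
          |PySem.List.pyGetD b 2 0 - PySem.List.pyGetD bb 2 0| ≤ m_margin)) = true then true else flag) := by
    funext flag bb
    by_cases h : |PySem.List.pyGetD b 1 0 - PySem.List.pyGetD bb 1 0| ≤ a_margin ∧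
        |PySem.List.pyGetD b 2 0 - PySem.List.pyGetD bb 2 0| ≤ m_margin <;> simp [h]
  rw [h, PySem.List.foldl_if_true_eq]; simp

-- one pass of A is a filter
lemma pvPassA (src other : List (List Int)) (a_margin nc_margin m_margin : Int) (acc : List (List Int)) :
    src.foldl (fun newColor b =>
      if (other.foldl (fun flag bb =>
            if |PySem.List.pyGetD b 1 0 - PySem.List.pyGetD bb 1 0| ≤ a_margin ∧
               |PySem.List.pyGetD b 2 0 - PySem.List.pyGetD bb 2 0| ≤ m_margin then true else flag) false) = false then
        if PySem.List.pyGetD b 0 0 > nc_margin ∨ PySem.List.pyGetD b 2 0 > m_margin then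
          newColor ++ [b]
        else newColor
      else newColor) acc
    = acc ++ src.filter (fun b =>
        !(other.any (fun bb => decide (|PySem.List.pyGetD b 1 0 - PySem.List.pyGetD bb 1 0| ≤ a_margin ∧
            |PySem.List.pyGetD b 2 0 - PySem.List.pyGetD bb 2 0| ≤ m_margin)))
        && decide (PySem.List.pyGetD b 0 0 > nc_margin ∨ PySem.List.pyGetD b 2 0 > m_margin)) := by
  have h : (fun (newColor : List (List Int)) b =>
      if (other.foldl (fun flag bb =>
            if |PySem.List.pyGetD b 1 0 - PySem.List.pyGetD bb 1 0| ≤ a_margin ∧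
               |PySem.List.pyGetD b 2 0 - PySem.List.pyGetD bb 2 0| ≤ m_margin then true else flag) false) = false then
        if PySem.List.pyGetD b 0 0 > nc_margin ∨ PySem.List.pyGetD b 2 0 > m_margin then
          newColor ++ [b]
        else newColor
      else newColor)
      = (fun newColor b =>
        if (!(other.any (fun bb => decide (|PySem.List.pyGetD b 1 0 - PySem.List.pyGetD bb 1 0| ≤ a_margin ∧
              |PySem.List.pyGetD b 2 0 - PySem.List.pyGetD bb 2 0| ≤ m_margin)))
            && decide (PySem.List.pyGetD b 0 0 > nc_margin ∨ PySem.List.pyGetD b 2 0 > m_margin)) = true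
          then newColor ++ [(fun x => x) b] else newColor) := by
    funext newColor b
    rw [pvFlag_eq]
    by_cases hq : PySem.List.pyGetD b 0 0 > nc_margin ∨ PySem.List.pyGetD b 2 0 > m_margin <;>
      cases hp : other.any (fun bb => decide (|PySem.List.pyGetD b 1 0 - PySem.List.pyGetD bb 1 0| ≤ a_margin ∧
          |PySem.List.pyGetD b 2 0 - PySem.List.pyGetD bb 2 0| ≤ m_margin)) <;> simp [hq]
  rw [h, PySem.List.foldl_append_if]
  simp

-- the binary-searched window over the sorted bar sees exactly the colors whose
-- hue lies inside [x, y]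
lemma pvAnyWindow (other : List (List Int)) (x y : Int) (p2 : List Int → Bool) :
    ((PySem.List.slice (PySem.List.sorted other (fun r => PySem.List.pyGetD r 1 0))
        (some ((PySem.List.bisectLeft ((PySem.List.sorted other (fun r => PySem.List.pyGetD r 1 0)).map (fun r => PySem.List.pyGetD r 1 0)) x : Nat) : Int))
        (some ((PySem.List.bisectRight ((PySem.List.sorted other (fun r => PySem.List.pyGetD r 1 0)).map (fun r => PySem.List.pyGetD r 1 0)) y : Nat) : Int))).any p2)
    = other.any (fun bb => (decide (x ≤ PySem.List.pyGetD bb 1 0) && decide (PySem.List.pyGetD bb 1 0 ≤ y)) && p2 bb) := by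
  set key : List Int → Int := fun r => PySem.List.pyGetD r 1 0 with hkeydef
  set srt := PySem.List.sorted other key with hsrt
  set keys := srt.map key with hkeys
  set lo := PySem.List.bisectLeft keys x with hlo
  set hi := PySem.List.bisectRight keys y with hhi
  have hpair : srt.Pairwise (fun a b => key a ≤ key b) := PySem.List.sorted_pairwise other key
  have hkp : keys.Pairwise (· ≤ ·) := List.pairwise_map.mpr hpair
  obtain ⟨hlo_le, hlt, hge⟩ := PySem.List.bisectLeft_spec keys x hkp
  obtain ⟨hhi_le, hle, hgt⟩ := PySem.List.bisectRight_spec keys y hkp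
  have hlen : keys.length = srt.length := by simp [hkeys]
  rw [PySem.List.slice_natCast]
  have hperm : srt.Perm other := PySem.List.sorted_perm other key false
  rw [← List.Perm.any_eq hperm]
  rw [Bool.eq_iff_iff]
  simp only [List.any_eq_true]
  constructor
  · rintro ⟨bb, hmem, hp⟩
    rw [List.mem_iff_getElem] at hmem
    obtain ⟨i, hilt, hieq⟩ := hmem
    have hlen2 : (List.take (hi - lo) (List.drop lo srt)).length = min (hi - lo) (srt.length - lo) := by
      simp [List.length_take, List.length_drop]
    rw [hlen2] at hilt
    have hj1 : lo + i < srt.length := by omega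
    have hjk : lo + i < keys.length := by omega
    have hval : bb = srt[lo + i] := by
      rw [← hieq]; rw [List.getElem_take, List.getElem_drop]
    refine ⟨srt[lo + i], List.getElem_mem hj1, ?_⟩
    have h1 : x ≤ keys[lo + i] := hge (lo + i) hjk (by omega)
    have h2 : keys[lo + i] ≤ y := hle (lo + i) hjk (by omega)
    simp only [hkeys, List.getElem_map] at h1 h2
    simp only [Bool.and_eq_true, decide_eq_true_eq]
    exact ⟨⟨h1, h2⟩, hval ▸ hp⟩
  · rintro ⟨bb, hmem, hp⟩
    simp only [Bool.and_eq_true, decide_eq_true_eq] at hp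
    obtain ⟨⟨h1, h2⟩, hp2⟩ := hp
    rw [List.mem_iff_getElem] at hmem
    obtain ⟨j, hjlt, hjeq⟩ := hmem
    have hjk : j < keys.length := by omega
    have hkj : keys[j] = key bb := by simp only [hkeys, List.getElem_map]; rw [hjeq]
    have hkbb : key bb = PySem.List.pyGetD bb 1 0 := rfl
    have hlo_j : lo ≤ j := by
      by_contra h
      have := hlt j hjk (by omega)
      rw [hkj, hkbb] at this; omega
    have hhi_j : j < hi := by
      by_contra h
      have := hgt j hjk (by omega)
      rw [hkj, hkbb] at this; omega
    have hlen2 : (List.take (hi - lo) (List.drop lo srt)).length = min (hi - lo) (srt.length - lo) := by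
      simp [List.length_take, List.length_drop]
    have hil : j - lo < (List.take (hi - lo) (List.drop lo srt)).length := by rw [hlen2]; omega
    refine ⟨(List.take (hi - lo) (List.drop lo srt))[j - lo], List.getElem_mem hil, ?_⟩
    have hv : (List.take (hi - lo) (List.drop lo srt))[j - lo] = srt[lo + (j - lo)] := by
      rw [List.getElem_take, List.getElem_drop]
    rw [hv]
    have hjj : lo + (j - lo) = j := by omega
    simp [hjj, hjeq, hp2]

-- B's window test equals A's full-scan test
lemma pvMatch_eq (b : List Int) (other : List (List Int)) (a_margin m_margin : Int) :
    ((PySem.List.slice (PySem.List.sorted other (fun r => PySem.List.pyGetD r 1 0))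
        (some ((PySem.List.bisectLeft ((PySem.List.sorted other (fun r => PySem.List.pyGetD r 1 0)).map (fun r => PySem.List.pyGetD r 1 0)) (PySem.List.pyGetD b 1 0 - a_margin) : Nat) : Int))
        (some ((PySem.List.bisectRight ((PySem.List.sorted other (fun r => PySem.List.pyGetD r 1 0)).map (fun r => PySem.List.pyGetD r 1 0)) (PySem.List.pyGetD b 1 0 + a_margin) : Nat) : Int))).any
      (fun bb => decide (|PySem.List.pyGetD b 2 0 - PySem.List.pyGetD bb 2 0| ≤ m_margin)))
    = other.any (fun bb => decide (|PySem.List.pyGetD b 1 0 - PySem.List.pyGetD bb 1 0| ≤ a_margin ∧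
        |PySem.List.pyGetD b 2 0 - PySem.List.pyGetD bb 2 0| ≤ m_margin)) := by
  rw [pvAnyWindow]
  apply PySem.List.any_congr_mem
  intro bb _
  rw [Bool.eq_iff_iff]
  simp only [Bool.and_eq_true, decide_eq_true_eq, abs_le]
  omega

-- one pass of B is the same filter
lemma pvNewColors_eq (src other : List (List Int)) (a_margin nc_margin m_margin : Int) :
    pvNewColors src other a_margin nc_margin m_margin
    = src.filter (fun b =>
        !(other.any (fun bb => decide (|PySem.List.pyGetD b 1 0 - PySem.List.pyGetD bb 1 0| ≤ a_margin ∧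
            |PySem.List.pyGetD b 2 0 - PySem.List.pyGetD bb 2 0| ≤ m_margin)))
        && decide (PySem.List.pyGetD b 0 0 > nc_margin ∨ PySem.List.pyGetD b 2 0 > m_margin)) := by
  simp only [pvNewColors]
  have h : (fun (out : List (List Int)) b =>
      if ((PySem.List.slice (PySem.List.sorted other (fun r => PySem.List.pyGetD r 1 0))
            (some ((PySem.List.bisectLeft ((PySem.List.sorted other (fun r => PySem.List.pyGetD r 1 0)).map (fun r => PySem.List.pyGetD r 1 0)) (PySem.List.pyGetD b 1 0 - a_margin) : Nat) : Int))
            (some ((PySem.List.bisectRight ((PySem.List.sorted other (fun r => PySem.List.pyGetD r 1 0)).map (fun r => PySem.List.pyGetD r 1 0)) (PySem.List.pyGetD b 1 0 + a_margin) : Nat) : Int))).any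
          (fun bb => decide (|PySem.List.pyGetD b 2 0 - PySem.List.pyGetD bb 2 0| ≤ m_margin))) = false ∧
         (PySem.List.pyGetD b 0 0 > nc_margin ∨ PySem.List.pyGetD b 2 0 > m_margin) then
        out ++ [b]
      else out)
      = (fun out b =>
        if (!(other.any (fun bb => decide (|PySem.List.pyGetD b 1 0 - PySem.List.pyGetD bb 1 0| ≤ a_margin ∧
              |PySem.List.pyGetD b 2 0 - PySem.List.pyGetD bb 2 0| ≤ m_margin)))
            && decide (PySem.List.pyGetD b 0 0 > nc_margin ∨ PySem.List.pyGetD b 2 0 > m_margin)) = true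
          then out ++ [(fun x => x) b] else out) := by
    funext out b
    rw [pvMatch_eq]
    by_cases hq : PySem.List.pyGetD b 0 0 > nc_margin ∨ PySem.List.pyGetD b 2 0 > m_margin <;>
      cases hp : other.any (fun bb => decide (|PySem.List.pyGetD b 1 0 - PySem.List.pyGetD bb 1 0| ≤ a_margin ∧
          |PySem.List.pyGetD b 2 0 - PySem.List.pyGetD bb 2 0| ≤ m_margin)) <;> simp [hq, hp]
  rw [h, PySem.List.foldl_append_if]
  simp

-- ===== VERDICT (by name: the statement is the Claim_ definition above) =====
theorem compareHSV_spec : Claim_equal_compareHSV := by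
  intro bar0 bar1 a_margin nc_margin m_margin _ _
  unfold Spec_compareHSV compareHSV compareHSV_alt
  rw [pvPassA, pvPassA, pvNewColors_eq, pvNewColors_eq]
  simp
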